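-- pv_equiv track=rewrite | github.com/aiki711/dirunc_probe | scripts/03_train_probe.py | expand_best_pm2
-- ===== SOURCE A (Python) =====
-- from typing import Any, Dict, List, Optional, Tuple, Sequence
--
-- def expand_best_pm2(best: int, num_layers: int) -> List[int]:
--     cands = [best - 2, best - 1, best, best + 1, best + 2]
--     cands = [max(0, min(num_layers - 1, c)) for c in cands]
--     out = []
--     for c in cands:
--         if c not in out:
--             out.append(c)
--     return out
-- ===== SOURCE B (Python) =====
-- def expand_best_pm2(best, num_layers):
--     lo = max(0, min(num_layers - 1, best - 2))
--     hi = max(0, min(num_layers - 1, best + 2))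
--     return list(range(lo, hi + 1))
-- ===== Notes on version B (the rewrite author's own statement) =====
-- stated objective: simpler
-- what changed: Instead of clamping five explicit candidates and running an order-preserving dedup loop, B clamps only the two endpoints best-2 and best+2 and returns list(range(lo, hi+1)), since the clamped consecutive offsets always form a contiguous run.
import Mathlib
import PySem

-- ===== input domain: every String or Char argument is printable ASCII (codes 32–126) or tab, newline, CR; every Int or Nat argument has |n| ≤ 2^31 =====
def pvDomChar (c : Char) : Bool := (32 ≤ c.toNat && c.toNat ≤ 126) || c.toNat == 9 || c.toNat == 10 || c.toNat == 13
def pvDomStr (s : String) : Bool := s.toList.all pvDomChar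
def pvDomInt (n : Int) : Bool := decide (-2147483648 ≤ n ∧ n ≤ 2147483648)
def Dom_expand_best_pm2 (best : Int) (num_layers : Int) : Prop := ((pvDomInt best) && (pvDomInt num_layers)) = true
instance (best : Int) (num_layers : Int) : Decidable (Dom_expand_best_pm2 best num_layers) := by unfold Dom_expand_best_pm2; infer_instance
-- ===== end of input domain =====

-- B replaces the five-element clamp-then-dedup loop by clamping only the two endpoints and
-- enumerating the contiguous range between them (simpler; same output).

-- ===== PORT A =====
def expand_best_pm2 (best : Int) (num_layers : Int) : List Int :=
  let cands := [best - 2, best - 1, best, best + 1, best + 2]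
  let cands := cands.map (fun c => max 0 (min (num_layers - 1) c))
  cands.foldl (fun out c => if out.contains c then out else out ++ [c]) []

-- ===== PORT B =====
def expand_best_pm2_alt (best : Int) (num_layers : Int) : List Int :=
  let lo := max 0 (min (num_layers - 1) (best - 2))
  let hi := max 0 (min (num_layers - 1) (best + 2))
  PySem.List.pyRange lo (hi + 1) 1

-- ===== PRECONDITION & SPEC =====
def Spec_expand_best_pm2 (best : Int) (num_layers : Int) (out : List Int) : Prop := out = expand_best_pm2_alt best num_layers
instance (best : Int) (num_layers : Int) (out : List Int) : Decidable (Spec_expand_best_pm2 best num_layers out) := by unfold Spec_expand_best_pm2; infer_instance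

-- ===== CLAIM (what is proved, stated in full; the proofs are below) =====
def Claim_equal_expand_best_pm2 : Prop := ∀ (best : Int) (num_layers : Int), Dom_expand_best_pm2 best num_layers → Spec_expand_best_pm2 best num_layers (expand_best_pm2 best num_layers)

-- ===== LEMMAS AND PROOFS =====

/-- Dedup-folding a 0/1-step nondecreasing chain onto an initial contiguous range
    extends the range up to the chain's last element. -/
lemma dedup_fold_chain (l : List Int) : ∀ (lo hi : Int), lo ≤ hi →
    List.IsChain (fun a b => b = a ∨ b = a + 1) (hi :: l) →
    l.foldl (fun out c => if out.contains c then out else out ++ [c])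
        (PySem.List.pyRange lo (hi + 1) 1)
      = PySem.List.pyRange lo ((l.foldl (fun _ b => b) hi) + 1) 1 := by
  induction l with
  | nil => intro lo hi _ _; rfl
  | cons c rest ih =>
    intro lo hi hle hch
    rw [List.isChain_cons_cons] at hch
    obtain ⟨hstep, hch⟩ := hch
    simp only [List.foldl]
    rcases hstep with h | h
    · subst h
      have hmem : ((PySem.List.pyRange lo (c + 1) 1).contains c) = true := by
        simp [PySem.List.mem_pyRange_one]; omega
      rw [hmem]
      simp only [if_true]
      exact ih lo c hle hch
    · subst h
      have hnmem : ((PySem.List.pyRange lo (hi + 1) 1).contains (hi + 1)) = false := by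
        simp [PySem.List.mem_pyRange_one]
      rw [hnmem]
      simp only [Bool.false_eq_true, if_false]
      rw [← PySem.List.pyRange_one_succ_right (by omega : lo ≤ hi + 1)]
      exact ih lo (hi + 1) (by omega) hch

-- ===== VERDICT (by name: the statement is the Claim_ definition above) =====
theorem expand_best_pm2_spec : Claim_equal_expand_best_pm2 := by
  intro best num_layers _
  unfold Spec_expand_best_pm2 expand_best_pm2 expand_best_pm2_alt
  set m := num_layers - 1 with hm
  set a : Int → Int := fun i => max 0 (min m (best + i)) with ha
  simp only [List.map]
  have e0 : max 0 (min m (best - 2)) = a (-2) := by simp [ha]; ring_nf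
  have e1 : max 0 (min m (best - 1)) = a (-1) := by simp [ha]; ring_nf
  have e2 : max 0 (min m best) = a 0 := by simp [ha]
  have e3 : max 0 (min m (best + 1)) = a 1 := by simp [ha]
  have e4 : max 0 (min m (best + 2)) = a 2 := by simp [ha]
  rw [e0, e1, e2, e3, e4]
  have hchain : List.IsChain (fun x y => y = x ∨ y = x + 1) [a (-2), a (-1), a 0, a 1, a 2] := by
    simp only [List.isChain_cons_cons, List.isChain_singleton, and_true, ha]
    omega
  have hstart : ([a (-2), a (-1), a 0, a 1, a 2].foldl
      (fun out c => if out.contains c then out else out ++ [c]) [])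
      = ([a (-1), a 0, a 1, a 2].foldl
      (fun out c => if out.contains c then out else out ++ [c])
      (PySem.List.pyRange (a (-2)) (a (-2) + 1) 1)) := by
    simp [PySem.List.pyRange_one_singleton]
  rw [hstart, dedup_fold_chain _ _ _ (le_refl _) hchain]
  simp [List.foldl]
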